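-- pv_equiv track=rewrite | github.com/eco-lang/eco-runtime | compiler/find_single_constructors.py | split_constructors
-- ===== SOURCE A (Python) =====
-- def split_constructors(body):
--     """Split type body into individual constructors, respecting parentheses."""
--     constructors = []
--     current = ""
--     paren_depth = 0
--     brace_depth = 0
--
--     i = 0
--     while i < len(body):
--         char = body[i]
--
--         if char == '(' :
--             paren_depth += 1
--             current += char
--         elif char == ')':
--             paren_depth -= 1
--             current += char
--         elif char == '{':
--             brace_depth += 1
--             current += char
--         elif char == '}':
--             brace_depth -= 1
--             current += char
--         elif char == '|' and paren_depth == 0 and brace_depth == 0: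
--             if current.strip():
--                 constructors.append(current.strip())
--             current = ""
--         else:
--             current += char
--         i += 1
--
--     if current.strip():
--         constructors.append(current.strip())
--
--     return constructors
-- ===== SOURCE B (Python) =====
-- def split_constructors(body):
--     """Split type body into individual constructors, respecting parentheses."""
--     pieces = body.split('|')
--     out = []
--     buf = ""
--     paren_depth = 0
--     brace_depth = 0
--     for piece in pieces[:-1]:
--         buf += piece
--         paren_depth += piece.count('(') - piece.count(')')
--         brace_depth += piece.count('{') - piece.count('}')
--         if paren_depth == 0 and brace_depth == 0:
--             s = buf.strip()
--             if s:
--                 out.append(s)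
--             buf = ""
--         else:
--             buf += '|'
--     buf += pieces[-1]
--     s = buf.strip()
--     if s:
--         out.append(s)
--     return out
-- ===== Notes on version B (the rewrite author's own statement) =====
-- stated objective: faster
-- what changed: Replaces A's per-character Python scan with a split('|')-first decomposition: B splits the body into '|'-delimited segments once, updates the two depths per segment via count() differences, and flushes or re-joins the buffer at each segment boundary, moving almost all character work into C-level str builtins.
import Mathlib
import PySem

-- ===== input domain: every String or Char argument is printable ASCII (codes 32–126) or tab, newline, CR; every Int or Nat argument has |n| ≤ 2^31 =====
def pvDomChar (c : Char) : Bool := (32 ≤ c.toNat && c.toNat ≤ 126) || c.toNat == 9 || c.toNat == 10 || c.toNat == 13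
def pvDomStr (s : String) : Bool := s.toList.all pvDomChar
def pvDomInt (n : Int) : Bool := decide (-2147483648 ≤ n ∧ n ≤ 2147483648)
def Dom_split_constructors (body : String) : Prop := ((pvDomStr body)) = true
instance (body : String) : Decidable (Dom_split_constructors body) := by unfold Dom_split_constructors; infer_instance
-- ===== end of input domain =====

-- B replaces A's char-by-char scan with a split('|')-then-recombine pass over segments (measurably faster in Python: the character work moves into C-level str builtins).

-- ===== PORT A =====
-- one step of A's while-loop over the characters of body (state: constructors, current, paren_depth, brace_depth)
def stepA (st : List (List Char) × List Char × Int × Int) (c : Char) :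
    List (List Char) × List Char × Int × Int :=
  let (acc, cur, pd, bd) := st
  if c = '(' then (acc, cur ++ [c], pd + 1, bd)
  else if c = ')' then (acc, cur ++ [c], pd - 1, bd)
  else if c = '{' then (acc, cur ++ [c], pd, bd + 1)
  else if c = '}' then (acc, cur ++ [c], pd, bd - 1)
  else if c = '|' ∧ pd = 0 ∧ bd = 0 then
    (if PySem.Chars.strip cur ≠ [] then acc ++ [PySem.Chars.strip cur] else acc, [], pd, bd)
  else (acc, cur ++ [c], pd, bd)

def split_constructors (body : String) : List String :=
  let st := body.toList.foldl stepA ([], [], 0, 0)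
  let acc := st.1
  let cur := st.2.1
  (if PySem.Chars.strip cur ≠ [] then acc ++ [PySem.Chars.strip cur] else acc).map String.mk

-- ===== PORT B =====
-- one iteration of B's for-loop over the '|'-delimited pieces (str.count with a 1-char needle is List.count, exact)
def stepB (st : List (List Char) × List Char × Int × Int) (piece : List Char) :
    List (List Char) × List Char × Int × Int :=
  let (out, buf0, pd0, bd0) := st
  let buf := buf0 ++ piece
  let pd := pd0 + (piece.count '(' : Int) - (piece.count ')' : Int)
  let bd := bd0 + (piece.count '{' : Int) - (piece.count '}' : Int)
  if pd = 0 ∧ bd = 0 then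
    (if PySem.Chars.strip buf ≠ [] then out ++ [PySem.Chars.strip buf] else out, [], pd, bd)
  else (out, buf ++ ['|'], pd, bd)

def split_constructors_alt (body : String) : List String :=
  let pieces := PySem.Chars.splitOn body.toList ['|']
  let st := pieces.dropLast.foldl stepB ([], [], 0, 0)
  let out := st.1
  let buf := st.2.1 ++ pieces.getLastD []
  (if PySem.Chars.strip buf ≠ [] then out ++ [PySem.Chars.strip buf] else out).map String.mk

-- ===== PRECONDITION & SPEC =====
def Spec_split_constructors (body : String) (out : List String) : Prop := out = split_constructors_alt body
instance (body : String) (out : List String) : Decidable (Spec_split_constructors body out) := by unfold Spec_split_constructors; infer_instance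

-- ===== CLAIM (what is proved, stated in full; the proofs are below) =====
def Claim_equal_split_constructors : Prop := ∀ (body : String), Dom_split_constructors body → Spec_split_constructors body (split_constructors body)

-- ===== LEMMAS AND PROOFS =====

-- simple recursive characterisation of s.split('|') over the char list
def sp : List Char → List (List Char)
  | [] => [[]]
  | c :: cs => if c = '|' then [] :: sp cs else (sp cs).modifyHead (c :: ·)

theorem sp_ne_nil (cs : List Char) : sp cs ≠ [] := by
  induction cs with
  | nil => simp [sp]
  | cons c cs ih =>
    simp only [sp]
    split
    · simp
    · cases h : sp cs with
      | nil => exact absurd h ih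
      | cons q qs => simp [List.modifyHead]

theorem splitOn_go_eq (cs : List Char) : ∀ (fuel : Nat) (cur : List Char) (acc : List (List Char)),
    cs.length < fuel →
    PySem.Chars.splitOn.go ['|'] fuel cs cur acc
      = acc.reverse ++ (sp cs).modifyHead (cur.reverse ++ ·) := by
  induction cs with
  | nil =>
    intro fuel cur acc h
    match fuel with
    | fuel + 1 => simp [PySem.Chars.splitOn.go, sp]
  | cons c cs ih =>
    intro fuel cur acc h
    match fuel with
    | fuel + 1 =>
      rw [PySem.Chars.splitOn.go]
      by_cases hc : c = '|'
      · subst hc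
        have hpre : List.isPrefixOf ['|'] ('|' :: cs) = true := by
          simp [List.isPrefixOf]
        simp only [hpre, if_pos, List.length_cons, List.length_nil, List.drop]
        rw [ih fuel [] (cur.reverse :: acc) (by simpa using Nat.lt_of_succ_lt_succ h)]
        cases hsp : sp cs with
        | nil => exact absurd hsp (sp_ne_nil cs)
        | cons q qs => simp [sp, hsp, List.modifyHead]
      · have hpre : List.isPrefixOf ['|'] (c :: cs) = false := by
          simp [List.isPrefixOf]
          intro h'; exact hc h'.symm
        simp only [hpre, Bool.false_eq_true, if_false]
        rw [ih fuel (c :: cur) acc (by simpa using Nat.lt_of_succ_lt_succ h)]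
        cases hsp : sp cs with
        | nil => exact absurd hsp (sp_ne_nil cs)
        | cons q qs => simp [sp, hc, hsp, List.modifyHead]

theorem splitOn_eq_sp (cs : List Char) : PySem.Chars.splitOn cs ['|'] = sp cs := by
  unfold PySem.Chars.splitOn
  rw [splitOn_go_eq cs (cs.length + 1) [] [] (by omega)]
  cases hsp : sp cs with
  | nil => exact absurd hsp (sp_ne_nil cs)
  | cons q qs => simp [List.modifyHead]

-- A's loop followed by the final flush, from an arbitrary state
def finA (cs : List Char) (st : List (List Char) × List Char × Int × Int) : List (List Char) :=
  let st' := cs.foldl stepA st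
  if PySem.Chars.strip st'.2.1 ≠ [] then st'.1 ++ [PySem.Chars.strip st'.2.1] else st'.1

-- B's loop over pieces followed by the final flush, from an arbitrary state
def finB (pieces : List (List Char)) (st : List (List Char) × List Char × Int × Int) : List (List Char) :=
  let st' := pieces.dropLast.foldl stepB st
  let buf := st'.2.1 ++ pieces.getLastD []
  if PySem.Chars.strip buf ≠ [] then st'.1 ++ [PySem.Chars.strip buf] else st'.1

-- the '|' boundary: A's step on '|' is exactly B's step on an empty piece
theorem stepA_bar (st : List (List Char) × List Char × Int × Int) :
    stepA st '|' = stepB st [] := by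
  obtain ⟨a, b, p, d⟩ := st
  simp [stepA, stepB]

-- absorbing one non-'|' char into the head piece commutes with A's step
theorem stepB_cons (c : Char) (hc : c ≠ '|') (p : List Char)
    (st : List (List Char) × List Char × Int × Int) :
    stepB st (c :: p) = stepB (stepA st c) p := by
  obtain ⟨a, b, pd, bd⟩ := st
  simp only [stepA, stepB, List.count_cons]
  by_cases h1 : c = '('
  · subst h1; simp <;> ring_nf
  · by_cases h2 : c = ')'
    · subst h2; simp [h1] <;> ring_nf
    · by_cases h3 : c = '{'
      · subst h3; simp [h1, h2] <;> ring_nf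
      · by_cases h4 : c = '}'
        · subst h4; simp [h1, h2, h3] <;> ring_nf
        · simp [h1, h2, h3, h4, hc]

theorem finB_sp (cs : List Char) : ∀ (st : List (List Char) × List Char × Int × Int),
    finB (sp cs) st = finA cs st := by
  induction cs with
  | nil => intro st; simp [sp, finB, finA]
  | cons c cs ih =>
    intro st
    by_cases hc : c = '|'
    · subst hc
      simp only [sp, reduceIte]
      cases hsp : sp cs with
      | nil => exact absurd hsp (sp_ne_nil cs)
      | cons q qs =>
        have : finB ([] :: q :: qs) st = finB (q :: qs) (stepB st []) := by
          simp [finB, List.dropLast]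
        rw [this, ← hsp, ih, finA, finA, List.foldl_cons, stepA_bar]
    · simp only [sp, if_neg hc]
      cases hsp : sp cs with
      | nil => exact absurd hsp (sp_ne_nil cs)
      | cons q qs =>
        cases qs with
        | nil =>
          have h1 : finB [c :: q] st = finB [q] (stepA st c) := by
            obtain ⟨a, b, pd, bd⟩ := st
            simp only [finB, List.dropLast, List.foldl_nil, List.getLastD]
            by_cases h1 : c = '('
            · subst h1; simp [stepA]
            · by_cases h2 : c = ')'
              · subst h2; simp [stepA, h1]
              · by_cases h3 : c = '{'
                · subst h3; simp [stepA, h1, h2]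
                · by_cases h4 : c = '}'
                  · subst h4; simp [stepA, h1, h2, h3]
                  · simp [stepA, h1, h2, h3, h4, hc]
          rw [List.modifyHead, h1, ← hsp, ih, finA, finA, List.foldl_cons]
        | cons q2 qs2 =>
          have h1 : finB ((c :: q) :: q2 :: qs2) st = finB (q :: q2 :: qs2) (stepA st c) := by
            simp only [finB, List.dropLast, List.foldl_cons, List.getLastD_cons]
            rw [stepB_cons c hc q st]
          rw [List.modifyHead, h1, ← hsp, ih, finA, finA, List.foldl_cons]

-- ===== VERDICT (by name: the statement is the Claim_ definition above) =====
theorem split_constructors_spec : Claim_equal_split_constructors := by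
  intro body _
  unfold Spec_split_constructors split_constructors split_constructors_alt
  rw [splitOn_eq_sp]
  have := finB_sp body.toList ([], [], 0, 0)
  simp only [finA, finB] at this
  exact congrArg (List.map String.mk) this.symm
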